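-- pv_equiv track=rewrite | github.com/shalini-susmita/data-structure-algorithms-problems | Array/arr_8.py | f
-- ===== SOURCE A (Python) =====
-- def f(x):
-- 	a=[]
-- 	b=[]
-- 	for i in x:
-- 		if i>=0:
-- 			a.append(i)
-- 		else:
-- 			b.append(i)
-- 	return [*a, *b]
-- ===== SOURCE B (Python) =====
-- def f(x):
--     return sorted(x, key=lambda i: i < 0)
-- ===== Notes on version B (the rewrite author's own statement) =====
-- stated objective: idiomatic
-- what changed: Replaces the two-bucket loop with a single stable sort keyed on the sign test (i < 0), relying on sort stability to keep non-negatives in order before negatives.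
import Mathlib
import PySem

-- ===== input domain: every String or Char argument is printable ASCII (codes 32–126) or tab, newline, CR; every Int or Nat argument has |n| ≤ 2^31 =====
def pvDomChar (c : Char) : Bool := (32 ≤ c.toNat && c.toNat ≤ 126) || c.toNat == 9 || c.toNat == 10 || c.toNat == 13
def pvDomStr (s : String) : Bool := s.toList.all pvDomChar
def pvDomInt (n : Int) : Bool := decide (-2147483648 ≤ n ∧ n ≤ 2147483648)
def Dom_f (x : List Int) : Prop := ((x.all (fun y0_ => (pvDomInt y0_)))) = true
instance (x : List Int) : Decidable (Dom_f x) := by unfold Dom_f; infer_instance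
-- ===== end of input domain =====

-- B replaces A's two-bucket loop with a single stable sort keyed on the sign test (idiomatic).

-- ===== PORT A =====
-- a/b buckets built by one pass, then concatenated: return [*a, *b]
def f (x : List Int) : List Int :=
  let r := x.foldl (fun (ab : List Int × List Int) i =>
    if i ≥ 0 then (ab.1 ++ [i], ab.2) else (ab.1, ab.2 ++ [i])) ([], [])
  r.1 ++ r.2

-- ===== PORT B =====
-- sorted(x, key=lambda i: i < 0) — stable sort, False (non-negative) before True (negative)
def f_alt (x : List Int) : List Int :=
  PySem.List.sorted x (fun i => decide (i < 0))

-- ===== PRECONDITION & SPEC =====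
def Spec_f (x : List Int) (out : List Int) : Prop := out = f_alt x
instance (x : List Int) (out : List Int) : Decidable (Spec_f x out) := by unfold Spec_f; infer_instance

-- ===== CLAIM (what is proved, stated in full; the proofs are below) =====
def Claim_equal_f : Prop := ∀ (x : List Int), Dom_f x → Spec_f x (f x)

-- ===== LEMMAS AND PROOFS =====

-- A's loop, generalized over the two accumulators
theorem f_loop (x : List Int) (a b : List Int) :
    x.foldl (fun (ab : List Int × List Int) i =>
      if i ≥ 0 then (ab.1 ++ [i], ab.2) else (ab.1, ab.2 ++ [i])) (a, b)
    = (a ++ x.filter (fun i => decide (0 ≤ i)), b ++ x.filter (fun i => decide (i < 0))) := by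
  induction x generalizing a b with
  | nil => simp
  | cons v t ih =>
    by_cases hv : 0 ≤ v
    · have hv' : ¬ v < 0 := by omega
      simp [List.foldl_cons, hv, hv', ih]
    · have hv' : v < 0 := by omega
      simp [List.foldl_cons, hv, hv', ih]

-- inserting a non-negative element into "non-negatives ++ negatives" lands at the boundary
theorem ins_nonneg (A B : List Int) (v : Int) (hv : 0 ≤ v)
    (hA : ∀ y ∈ A, 0 ≤ y) (hB : ∀ y ∈ B, y < 0) :
    PySem.List.insertBy
      (fun a b => decide ((decide (a < 0) : Bool) < (decide (b < 0) : Bool))) v (A ++ B)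
    = A ++ v :: B := by
  induction A with
  | nil =>
    cases B with
    | nil => simp [PySem.List.insertBy]
    | cons b B' =>
      have hb : b < 0 := hB b (by simp)
      have h1 : ¬ v < 0 := by omega
      simp [PySem.List.insertBy, h1, hb]
  | cons a A' ih =>
    have ha : 0 ≤ a := hA a (by simp)
    have h1 : ¬ a < 0 := by omega
    have := ih (fun y hy => hA y (by simp [hy]))
    by_cases h2 : v < 0
    · omega
    · simp [PySem.List.insertBy, h1, h2] at this ⊢
      exact this

-- inserting a negative element appends it at the end
theorem ins_neg (ys : List Int) (v : Int) (hv : v < 0) :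
    PySem.List.insertBy
      (fun a b => decide ((decide (a < 0) : Bool) < (decide (b < 0) : Bool))) v ys
    = ys ++ [v] := by
  apply PySem.List.insertBy_of_forall_not_before
  intro y _
  simp [hv]

-- insertion-sort loop invariant: the accumulator stays "non-negatives ++ negatives",
-- each part in input order
theorem sort_loop (x : List Int) (A B : List Int)
    (hA : ∀ y ∈ A, 0 ≤ y) (hB : ∀ y ∈ B, y < 0) :
    x.foldl (fun acc v =>
        PySem.List.insertBy
          (fun a b => decide ((decide (a < 0) : Bool) < (decide (b < 0) : Bool))) v acc)
      (A ++ B)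
    = (A ++ x.filter (fun i => decide (0 ≤ i))) ++ (B ++ x.filter (fun i => decide (i < 0))) := by
  induction x generalizing A B with
  | nil => simp
  | cons v t ih =>
    by_cases hv : 0 ≤ v
    · have hv' : ¬ v < 0 := by omega
      have hstep := ins_nonneg A B v hv hA hB
      have hrec := ih (A ++ [v]) B
        (by intro y hy; rcases List.mem_append.mp hy with h | h
            · exact hA y h
            · simp at h; omega) hB
      simp only [List.foldl_cons, hstep]
      have : A ++ v :: B = (A ++ [v]) ++ B := by simp
      rw [this, hrec]
      simp [hv, hv']
    · have hv' : v < 0 := by omega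
      have hstep := ins_neg (A ++ B) v hv'
      have hrec := ih A (B ++ [v]) hA
        (by intro y hy; rcases List.mem_append.mp hy with h | h
            · exact hB y h
            · simp at h; omega)
      simp only [List.foldl_cons, hstep]
      have : (A ++ B) ++ [v] = A ++ (B ++ [v]) := by simp
      rw [this, hrec]
      simp [hv, hv']

-- ===== VERDICT (by name: the statement is the Claim_ definition above) =====
theorem f_spec : Claim_equal_f := by
  intro x _
  show f x = f_alt x
  unfold f f_alt
  rw [PySem.List.sorted_eq_foldl_insertBy]
  have hA := f_loop x [] []
  have hB := sort_loop x [] [] (by simp) (by simp)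
  simp only [List.nil_append] at hA hB
  simp [hA, hB]
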